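-- pv_equiv track=rewrite | github.com/El-Banderas/RFM-TP3 | html_stuff.py | _interference_Channels
-- ===== SOURCE A (Python) =====
-- def _interference_Channels(used_channels):
-- 	channels = sorted(set(list(used_channels)))
-- 	channels_with_interference = list(filter(lambda channel: ((channel+1) in channels) or ((channel-1) in channels), channels))
--
-- 	if len(channels_with_interference) < 1:
-- 		return ""
-- 	result = "Channels with close neibourghs (the could interfere with each other):<ul>"
-- 	for elem in channels_with_interference:
-- 		#result += _main_table_line(elem)
-- 		result += f"<li>{elem}</li>"
-- 	result += " </ul>\n"
-- 	return result
-- ===== SOURCE B (Python) =====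
-- def _interference_Channels(used_channels):
-- 	channels = sorted(set(used_channels))
-- 	marked = set()
-- 	for a, b in zip(channels, channels[1:]):
-- 		if b - a == 1:
-- 			marked.add(a)
-- 			marked.add(b)
-- 	if not marked:
-- 		return ""
-- 	parts = ["Channels with close neibourghs (the could interfere with each other):<ul>"]
-- 	for c in channels:
-- 		if c in marked:
-- 			parts.append(f"<li>{c}</li>")
-- 	parts.append(" </ul>\n")
-- 	return "".join(parts)
-- ===== Notes on version B (the rewrite author's own statement) =====
-- stated objective: faster
-- what changed: Replaces the per-element membership scan of the whole sorted list ((c+1) in channels or (c-1) in channels, O(n) per element) by a single linear pass over consecutive pairs of the sorted deduplicated list that marks both ends of each gap-1 pair into a set, then filters the sorted list by that set and joins the HTML pieces.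
import Mathlib
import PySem

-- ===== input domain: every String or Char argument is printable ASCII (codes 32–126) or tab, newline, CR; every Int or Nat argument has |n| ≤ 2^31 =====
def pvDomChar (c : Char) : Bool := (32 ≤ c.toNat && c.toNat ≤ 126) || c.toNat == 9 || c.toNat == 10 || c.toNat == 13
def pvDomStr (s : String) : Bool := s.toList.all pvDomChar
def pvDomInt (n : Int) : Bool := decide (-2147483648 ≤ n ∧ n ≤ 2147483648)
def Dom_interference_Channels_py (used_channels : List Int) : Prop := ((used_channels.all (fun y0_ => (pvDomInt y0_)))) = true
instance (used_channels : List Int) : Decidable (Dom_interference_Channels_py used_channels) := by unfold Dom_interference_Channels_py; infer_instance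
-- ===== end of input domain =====

-- B replaces A's per-element whole-list membership scan by one linear pass over
-- consecutive pairs of the sorted deduplicated list (faster in a timing run).

-- ===== PORT A =====
def interference_Channels_py (used_channels : List Int) : String :=
  let channels := PySem.List.sorted (PySem.Set.ofList used_channels) (fun x => x) false
  let channels_with_interference :=
    channels.filter (fun channel => channels.contains (channel + 1) || channels.contains (channel - 1))
  if channels_with_interference.length < 1 then ""
  else
    let result : List Char := "Channels with close neibourghs (the could interfere with each other):<ul>".toList
    let result := channels_with_interference.foldl
      (fun acc elem => acc ++ ("<li>".toList ++ PySem.Int.toChars elem ++ "</li>".toList)) result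
    String.ofList (result ++ " </ul>\n".toList)

-- ===== PORT B =====
def interference_Channels_py_alt (used_channels : List Int) : String :=
  let channels := PySem.List.sorted (PySem.Set.ofList used_channels) (fun x => x) false
  let marked : PySem.Set Int := (channels.zip channels.tail).foldl
    (fun s p => if p.2 - p.1 == 1 then PySem.Set.add (PySem.Set.add s p.1) p.2 else s) PySem.Set.empty
  if marked.isEmpty then ""
  else
    let parts : List (List Char) :=
      "Channels with close neibourghs (the could interfere with each other):<ul>".toList ::
      ((channels.filter (fun c => marked.contains c)).map
        (fun c => "<li>".toList ++ PySem.Int.toChars c ++ "</li>".toList)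
       ++ [" </ul>\n".toList])
    String.ofList (PySem.Chars.join [] parts)

-- ===== PRECONDITION & SPEC =====
def Spec_interference_Channels_py (used_channels : List Int) (out : String) : Prop := out = interference_Channels_py_alt used_channels
instance (used_channels : List Int) (out : String) : Decidable (Spec_interference_Channels_py used_channels out) := by unfold Spec_interference_Channels_py; infer_instance

-- ===== CLAIM (what is proved, stated in full; the proofs are below) =====
def Claim_equal_interference_Channels_py : Prop := ∀ (used_channels : List Int), Dom_interference_Channels_py used_channels → Spec_interference_Channels_py used_channels (interference_Channels_py used_channels)

-- ===== LEMMAS AND PROOFS =====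

-- membership in B's `marked` set, by the fold
theorem mem_marked_fold (pairs : List (Int × Int)) (s : PySem.Set Int) (c : Int) :
    (c ∈ pairs.foldl
      (fun s p => if p.2 - p.1 == 1 then PySem.Set.add (PySem.Set.add s p.1) p.2 else s) s) ↔
    (c ∈ s ∨ ∃ p ∈ pairs, p.2 - p.1 = 1 ∧ (c = p.1 ∨ c = p.2)) := by
  induction pairs generalizing s with
  | nil => simp
  | cons q t ih =>
    simp only [List.foldl_cons, List.mem_cons]
    by_cases hq : q.2 - q.1 = 1
    · simp only [hq, beq_self_eq_true, if_pos, ih, PySem.Set.mem_add]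
      constructor
      · rintro (((h | h) | h) | ⟨p, hp, h1, h2⟩)
        · exact Or.inl h
        · exact Or.inr ⟨q, Or.inl rfl, hq, Or.inl h⟩
        · exact Or.inr ⟨q, Or.inl rfl, hq, Or.inr h⟩
        · exact Or.inr ⟨p, Or.inr hp, h1, h2⟩
      · rintro (h | ⟨p, (rfl | hp), h1, h2⟩)
        · exact Or.inl (Or.inl (Or.inl h))
        · rcases h2 with h2 | h2
          · exact Or.inl (Or.inl (Or.inr h2))
          · exact Or.inl (Or.inr h2)
        · exact Or.inr ⟨p, hp, h1, h2⟩
    · have : (q.2 - q.1 == 1) = false := by simpa using hq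
      simp only [this, Bool.false_eq_true, ih]
      constructor
      · rintro (h | ⟨p, hp, h1, h2⟩)
        · exact Or.inl h
        · exact Or.inr ⟨p, Or.inr hp, h1, h2⟩
      · rintro (h | ⟨p, (rfl | hp), h1, h2⟩)
        · exact Or.inl h
        · exact absurd h1 hq
        · exact Or.inr ⟨p, hp, h1, h2⟩

-- in a strictly increasing list, two consecutive integers are adjacent entries
theorem pair_mem_zip_of_succ {l : List Int} (h : l.Pairwise (· < ·)) {a : Int}
    (ha : a ∈ l) (hb : a + 1 ∈ l) : (a, a + 1) ∈ l.zip l.tail := by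
  induction l with
  | nil => simp at ha
  | cons x t ih =>
    rcases List.pairwise_cons.mp h with ⟨hx, ht⟩
    rcases List.mem_cons.mp ha with rfl | hat
    · have hbt : a + 1 ∈ t := by
        rcases List.mem_cons.mp hb with h' | h'
        · omega
        · exact h'
      cases t with
      | nil => simp at hbt
      | cons y t' =>
        have hxy : a < y := hx y (List.mem_cons_self ..)
        have hy : y = a + 1 := by
          rcases List.mem_cons.mp hbt with h' | h'
          · omega
          · have := (List.pairwise_cons.mp ht).1 _ h'
            omega
        subst hy
        simp [List.zip]
    · have hbt : a + 1 ∈ t := by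
        have hxa : x < a := hx a hat
        rcases List.mem_cons.mp hb with h' | h'
        · omega
        · exact h'
      have := ih ht hat hbt
      cases t with
      | nil => simp at hat
      | cons y t' =>
        simp only [List.tail_cons] at this ⊢
        exact List.mem_cons_of_mem _ (by simpa using this)

theorem mem_of_zip_tail {l : List Int} {p : Int × Int} (hp : p ∈ l.zip l.tail) :
    p.1 ∈ l ∧ p.2 ∈ l := by
  have hp' : (p.1, p.2) ∈ l.zip l.tail := by simpa using hp
  obtain ⟨h1, h2⟩ := List.of_mem_zip hp'
  exact ⟨h1, List.mem_of_mem_tail h2⟩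

-- join with the empty separator is concatenation
theorem join_nil_eq_flatten (parts : List (List Char)) :
    PySem.Chars.join [] parts = parts.flatten := by
  induction parts with
  | nil => simp [PySem.Chars.join_nil]
  | cons h t ih =>
    cases t with
    | nil => simp [PySem.Chars.join_singleton]
    | cons h' t' => simp [PySem.Chars.join_cons_cons, ih]

-- ===== VERDICT (by name: the statement is the Claim_ definition above) =====
theorem interference_Channels_py_spec : Claim_equal_interference_Channels_py := by
  intro xs _
  unfold Spec_interference_Channels_py interference_Channels_py interference_Channels_py_alt
  dsimp only
  set l := PySem.List.sorted (PySem.Set.ofList xs) (fun x => x) false with hl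
  have hsorted : l.Pairwise (· < ·) := PySem.List.sorted_ofList_pairwise_lt xs
  set marked : PySem.Set Int := (l.zip l.tail).foldl
    (fun s p => if p.2 - p.1 == 1 then PySem.Set.add (PySem.Set.add s p.1) p.2 else s)
    PySem.Set.empty with hm
  have hmem : ∀ c : Int, c ∈ marked ↔
      ∃ p ∈ l.zip l.tail, p.2 - p.1 = 1 ∧ (c = p.1 ∨ c = p.2) := by
    intro c
    rw [hm, mem_marked_fold]
    simp [PySem.Set.empty]
  -- the two filters pick the same elements
  have hfilter : l.filter (fun c => l.contains (c + 1) || l.contains (c - 1))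
      = l.filter (fun c => marked.contains c) := by
    apply List.filter_congr
    intro c hc
    simp only [List.contains_eq_mem, PySem.Set.contains]
    rw [← Bool.decide_or, decide_eq_decide]
    constructor
    · rintro (h | h)
      · exact (hmem c).mpr ⟨(c, c + 1), pair_mem_zip_of_succ hsorted hc h, by omega, Or.inl rfl⟩
      · refine (hmem c).mpr ⟨(c - 1, c), ?_, by omega, Or.inr rfl⟩
        have := pair_mem_zip_of_succ hsorted h (by simpa using hc)
        simpa using this
    · intro h
      obtain ⟨p, hp, h1, h2⟩ := (hmem c).mp h
      obtain ⟨hp1, hp2⟩ := mem_of_zip_tail hp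
      rcases h2 with rfl | rfl
      · exact Or.inl (by rwa [show p.1 + 1 = p.2 by omega])
      · exact Or.inr (by rwa [show p.2 - 1 = p.1 by omega])
  -- the emptiness tests agree
  have hempty : (l.filter (fun c => marked.contains c)).length < 1 ↔ marked.isEmpty := by
    constructor
    · intro h
      have hnil : l.filter (fun c => marked.contains c) = [] := by
        cases h' : l.filter (fun c => marked.contains c) with
        | nil => rfl
        | cons a t => rw [h'] at h; simp at h
      rw [List.isEmpty_iff]
      cases hmk : marked with
      | nil => rfl
      | cons c t =>
        exfalso
        have hcm : c ∈ marked := by rw [hmk]; exact List.mem_cons_self ..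
        obtain ⟨p, hp, h1, h2⟩ := (hmem c).mp hcm
        obtain ⟨hp1, hp2⟩ := mem_of_zip_tail hp
        have hcl : c ∈ l := by rcases h2 with rfl | rfl <;> assumption
        have : c ∈ l.filter (fun c => marked.contains c) := by
          apply List.mem_filter.mpr
          exact ⟨hcl, by simpa [PySem.Set.contains] using hcm⟩
        rw [hnil] at this; simp at this
    · intro h
      rw [List.isEmpty_iff] at h
      have hnil : l.filter (fun c => marked.contains c) = [] := by
        rw [h]
        simp [PySem.Set.contains]
      rw [hnil]
      simp
  rw [hfilter]
  by_cases he : marked.isEmpty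
  · rw [if_pos (hempty.mpr he), if_pos he]
  · rw [if_neg (fun h => he (hempty.mp h)), if_neg he]
    congr 1
    rw [join_nil_eq_flatten]
    rw [PySem.List.foldl_append_eq_flatMap]
    simp [List.flatMap_def]
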